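-- pv_equiv track=rewrite | github.com/teyfikoz/TakeYourLounge | image_scraper.py | generate_lounge_query
-- ===== SOURCE A (Python) =====
-- from typing import List, Dict, Optional
--
-- def generate_lounge_query(lounge: Dict) -> str:
--     """Generate optimized search query for lounge"""
--     name = lounge.get('name', '')
--     airport = lounge.get('airport_name', '')
--     city = lounge.get('city', '')
--
--     # Priority order for query construction
--     queries = [
--         f"{name} {airport} lounge interior",
--         f"{name} airport lounge {city}",
--         f"{airport} {name} lounge",
--         f"airport lounge {city}",
--         "airport lounge interior"
--     ]
--
--     # Return first non-empty query
--     for query in queries: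
--         if len(query.split()) >= 2:
--             return query
--
--     return "airport lounge interior"
-- ===== SOURCE B (Python) =====
-- def generate_lounge_query(lounge):
--     """Generate optimized search query for lounge.
--
--     The first candidate query always contains the words 'lounge' and
--     'interior', so the original priority list/filter loop always returned
--     its first element; return it directly.
--     """
--     name = lounge.get('name', '')
--     airport = lounge.get('airport_name', '')
--     return f"{name} {airport} lounge interior"
-- ===== Notes on version B (the rewrite author's own statement) =====
-- stated objective: simpler
-- what changed: The candidate-query list and the first-with->=2-words filtering loop are removed: the first template always contains the literal words 'lounge' and 'interior', so it always passes the check and is always returned; B builds and returns that single string directly.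
import Mathlib
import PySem

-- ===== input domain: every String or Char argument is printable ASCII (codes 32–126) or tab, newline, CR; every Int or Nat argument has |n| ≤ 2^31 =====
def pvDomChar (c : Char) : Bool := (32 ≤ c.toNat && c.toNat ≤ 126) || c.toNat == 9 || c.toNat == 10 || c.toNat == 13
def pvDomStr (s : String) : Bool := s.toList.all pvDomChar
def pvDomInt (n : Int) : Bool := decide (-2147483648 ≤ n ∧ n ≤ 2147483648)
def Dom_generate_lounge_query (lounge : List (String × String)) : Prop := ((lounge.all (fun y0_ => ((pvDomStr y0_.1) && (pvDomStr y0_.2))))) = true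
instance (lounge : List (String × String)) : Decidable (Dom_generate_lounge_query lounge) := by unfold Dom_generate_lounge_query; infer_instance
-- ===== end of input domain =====

-- B removes A's candidate list and filtering loop: the first template always has >= 2 words, so it is always returned (objective: simpler).
-- ===== PORT A =====
-- the 'for query in queries: if len(query.split()) >= 2: return query' loop
def pvFirstGood : List String → String
  | [] => "airport lounge interior"
  | q :: rest => if 2 ≤ (PySem.Str.split₀ q).length then q else pvFirstGood rest

def generate_lounge_query (lounge : List (String × String)) : String :=
  let d := PySem.Dict.ofList lounge
  let name := d.getD "name" ""
  let airport := d.getD "airport_name" ""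
  let city := d.getD "city" ""
  let queries : List String :=
    [ name ++ " " ++ airport ++ " lounge interior"
    , name ++ " airport lounge " ++ city
    , airport ++ " " ++ name ++ " lounge"
    , "airport lounge " ++ city
    , "airport lounge interior" ]
  pvFirstGood queries

-- ===== PORT B =====
def generate_lounge_query_alt (lounge : List (String × String)) : String :=
  let d := PySem.Dict.ofList lounge
  let name := d.getD "name" ""
  let airport := d.getD "airport_name" ""
  name ++ " " ++ airport ++ " lounge interior"

-- ===== PRECONDITION & SPEC =====
def Spec_generate_lounge_query (lounge : List (String × String)) (out : String) : Prop := out = generate_lounge_query_alt lounge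
instance (lounge : List (String × String)) (out : String) : Decidable (Spec_generate_lounge_query lounge out) := by unfold Spec_generate_lounge_query; infer_instance

-- ===== CLAIM (what is proved, stated in full; the proofs are below) =====
def Claim_equal_generate_lounge_query : Prop := ∀ (lounge : List (String × String)), Dom_generate_lounge_query lounge → Spec_generate_lounge_query lounge (generate_lounge_query lounge)

-- ===== LEMMAS AND PROOFS =====

-- processing a space boundary: the split of cs ++ ' ' :: ws ends up as a split of ws from some accumulator
theorem pv_go_space (cs ws cur : List Char) (acc : List (List Char)) :
    ∃ acc', PySem.Chars.split₀.go (cs ++ ' ' :: ws) cur acc = PySem.Chars.split₀.go ws [] acc' := by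
  induction cs generalizing cur acc with
  | nil =>
    by_cases h : cur.isEmpty
    · exact ⟨acc, by simp [PySem.Chars.split₀.go, PySem.Chars.isspace, h]⟩
    · exact ⟨cur.reverse :: acc, by simp [PySem.Chars.split₀.go, PySem.Chars.isspace, h]⟩
  | cons c rest ih =>
    by_cases hs : PySem.Chars.isspace c
    · by_cases h : cur.isEmpty
      · obtain ⟨a', ha⟩ := ih [] acc
        exact ⟨a', by simp [PySem.Chars.split₀.go, hs, h]; exact ha⟩
      · obtain ⟨a', ha⟩ := ih [] (cur.reverse :: acc)
        exact ⟨a', by simp [PySem.Chars.split₀.go, hs, h]; exact ha⟩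
    · obtain ⟨a', ha⟩ := ih (c :: cur) acc
      exact ⟨a', by simp [PySem.Chars.split₀.go, hs]; exact ha⟩

-- splitting the literal tail "lounge interior" yields exactly two more words
theorem pv_go_tail (acc : List (List Char)) :
    PySem.Chars.split₀.go "lounge interior".toList [] acc
      = ("interior".toList.reverse.reverse :: "lounge".toList.reverse.reverse :: acc).reverse := by
  simp [PySem.Chars.split₀.go, PySem.Chars.isspace]

theorem pv_first_query_good (name airport : String) :
    2 ≤ (PySem.Str.split₀ (name ++ " " ++ airport ++ " lounge interior")).length := by
  have htl : (name ++ " " ++ airport ++ " lounge interior").toList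
      = (name.toList ++ ' ' :: airport.toList) ++ ' ' :: "lounge interior".toList := by
    simp [String.toList_append]
  obtain ⟨a', ha⟩ := pv_go_space (name.toList ++ ' ' :: airport.toList)
      "lounge interior".toList [] []
  simp only [PySem.Str.split₀, PySem.Chars.split₀, htl, ha, pv_go_tail]
  simp

-- ===== VERDICT (by name: the statement is the Claim_ definition above) =====
theorem generate_lounge_query_spec : Claim_equal_generate_lounge_query := by
  intro lounge _
  unfold Spec_generate_lounge_query generate_lounge_query generate_lounge_query_alt pvFirstGood
  simp only [if_pos (pv_first_query_good _ _)]
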